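-- pv_equiv track=rewrite | github.com/HeDaas-Code/Neo_Agent | knowledge_base.py | _generate_knowledge_summary
-- ===== SOURCE A (Python) =====
-- from typing import List, Dict, Any, Optional
--
-- def _generate_knowledge_summary(entities: List[str], knowledge_items: List[Dict]) -> str:
--     """
--     生成知识摘要文本
--
--     Args:
--         entities: 识别到的实体列表
--         knowledge_items: 知识项列表
--
--     Returns:
--         摘要文本
--     """
--     if not entities:
--         return '未找到相关主体。'
--
--     if not knowledge_items:
--         return f'识别到主体：{", ".join(entities)}，但知识库中暂无相关信息。'
--
--     # 按主体分组
--     by_entity = {}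
--     for item in knowledge_items:
--         entity_name = item['entity_name']
--         if entity_name not in by_entity:
--             by_entity[entity_name] = []
--         by_entity[entity_name].append(item)
--
--     summary_parts = [f'识别到 {len(entities)} 个相关主体：{", ".join(entities)}。']
--     summary_parts.append('\n相关知识：')
--
--     for entity_name, items in by_entity.items():
--         definitions = [i for i in items if i['type'] == '定义']
--         others = [i for i in items if i['type'] != '定义']
--
--         if definitions:
--             summary_parts.append(f'\n• {entity_name}: {definitions[0]["content"]}')
--
--         if others:
--             for item in others[:2]:  # 最多显示2条相关信息
--                 summary_parts.append(f'  - {item["type"]}: {item["content"][:50]}...')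
--
--     return ''.join(summary_parts)
-- ===== SOURCE B (Python) =====
-- def _generate_knowledge_summary(entities, knowledge_items):
--     if not entities:
--         return '未找到相关主体。'
--
--     if not knowledge_items:
--         return f'识别到主体：{", ".join(entities)}，但知识库中暂无相关信息。'
--
--     # entity order = first occurrence among the items
--     names = list(dict.fromkeys(item['entity_name'] for item in knowledge_items))
--
--     out = f'识别到 {len(entities)} 个相关主体：{", ".join(entities)}。'
--     out += '\n相关知识：'
--
--     for name in names:
--         definition = None
--         others = []
--         # one scan classifying this entity's items on the fly
--         for item in knowledge_items:
--             if item['entity_name'] == name: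
--                 if item['type'] == '定义':
--                     if definition is None:
--                         definition = item['content']
--                 elif len(others) < 2:
--                     others.append((item['type'], item['content']))
--         if definition is not None:
--             out += f'\n• {name}: {definition}'
--         for t, c in others:
--             out += f'  - {t}: {c[:50]}...'
--
--     return out
-- ===== Notes on version B (the rewrite author's own statement) =====
-- stated objective: alternative
-- what changed: B drops A's dict-of-lists grouping and double filtering: it takes the first-occurrence entity order via dict.fromkeys and, per entity, a single scan of knowledge_items that picks the first definition and caps the other items at two on the fly, appending straight to the output string instead of a parts list.
import Mathlib
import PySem

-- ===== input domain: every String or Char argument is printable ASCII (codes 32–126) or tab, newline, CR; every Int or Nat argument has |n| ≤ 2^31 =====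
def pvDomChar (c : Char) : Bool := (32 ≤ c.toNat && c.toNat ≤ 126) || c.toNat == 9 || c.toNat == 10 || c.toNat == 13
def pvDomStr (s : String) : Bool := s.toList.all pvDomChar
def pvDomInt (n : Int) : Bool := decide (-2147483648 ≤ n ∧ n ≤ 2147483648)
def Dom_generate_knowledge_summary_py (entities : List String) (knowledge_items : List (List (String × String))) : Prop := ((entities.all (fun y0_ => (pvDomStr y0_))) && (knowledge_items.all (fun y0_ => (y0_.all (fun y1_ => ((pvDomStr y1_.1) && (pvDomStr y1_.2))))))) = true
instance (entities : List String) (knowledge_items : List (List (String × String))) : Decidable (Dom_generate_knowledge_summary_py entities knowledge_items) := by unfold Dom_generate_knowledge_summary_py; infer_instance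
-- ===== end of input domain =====

-- B replaces A's dict-of-lists grouping plus double filtering by a first-occurrence
-- entity list and one classifying scan per entity, concatenating the output string
-- directly (alternative decomposition, same results).


-- shared helpers for both ports: dict lookup item[k] (getD "" is only reached where
-- Python would raise KeyError — those inputs are outside Pre_) and the string slice s[:50]
def pvKey (item : List (String × String)) (k : String) : String :=
  ((PySem.Dict.mk item).get? k).getD ""

def pvTrunc50 (s : String) : String :=
  String.ofList (PySem.List.slice s.toList none (some 50))   -- s[:50], exact (nonnegative bound)

-- ===== PORT A =====
def generate_knowledge_summary_py (entities : List String) (knowledge_items : List (List (String × String))) : String :=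
  if entities = [] then "未找到相关主体。"
  else if knowledge_items = [] then
    "识别到主体：" ++ PySem.Str.join ", " entities ++ "，但知识库中暂无相关信息。"
  else
    -- 按主体分组
    let by_entity : PySem.Dict String (List (List (String × String))) :=
      knowledge_items.foldl (fun d item =>
        let entity_name := pvKey item "entity_name"
        let d := if d.contains entity_name then d else d.insert entity_name []
        d.insert entity_name (d.getD entity_name [] ++ [item])) PySem.Dict.empty
    let summary_parts : List String :=
      ["识别到 " ++ PySem.Int.toStr (entities.length : Int) ++ " 个相关主体：" ++ PySem.Str.join ", " entities ++ "。"]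
    let summary_parts := summary_parts ++ ["\n相关知识："]
    let summary_parts := by_entity.items.foldl (fun parts p =>
      let definitions := p.2.filter (fun i => pvKey i "type" == "定义")
      let others := p.2.filter (fun i => !(pvKey i "type" == "定义"))
      let parts := match definitions with
        | [] => parts
        | d0 :: _ => parts ++ ["\n• " ++ p.1 ++ ": " ++ pvKey d0 "content"]
      (PySem.List.slice others none (some 2)).foldl (fun parts item =>
        parts ++ ["  - " ++ pvKey item "type" ++ ": " ++ pvTrunc50 (pvKey item "content") ++ "..."]) parts)
      summary_parts
    PySem.Str.join "" summary_parts

-- ===== PORT B =====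
def generate_knowledge_summary_py_alt (entities : List String) (knowledge_items : List (List (String × String))) : String :=
  if entities = [] then "未找到相关主体。"
  else if knowledge_items = [] then
    "识别到主体：" ++ PySem.Str.join ", " entities ++ "，但知识库中暂无相关信息。"
  else
    let names := PySem.List.dedup (knowledge_items.map (fun item => pvKey item "entity_name"))
    let out := "识别到 " ++ PySem.Int.toStr (entities.length : Int) ++ " 个相关主体：" ++ PySem.Str.join ", " entities ++ "。"
    let out := out ++ "\n相关知识："
    names.foldl (fun out name =>
      let st : Option String × List (String × String) :=
        knowledge_items.foldl (fun st item =>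
          if pvKey item "entity_name" == name then
            if pvKey item "type" == "定义" then
              match st.1 with
              | none => (some (pvKey item "content"), st.2)
              | some _ => st
            else if st.2.length < 2 then (st.1, st.2 ++ [(pvKey item "type", pvKey item "content")])
            else st
          else st) (none, [])
      let out := match st.1 with
        | none => out
        | some c => out ++ "\n• " ++ name ++ ": " ++ c
      st.2.foldl (fun out tc => out ++ "  - " ++ tc.1 ++ ": " ++ pvTrunc50 tc.2 ++ "...") out) out

-- ===== PRECONDITION & SPEC =====
-- Pre_ restricts the items to the knowledge-item shape A is written for: each item dict has
-- distinct keys (a Python dict cannot carry duplicates) including 'entity_name', 'type' and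
-- 'content'; A raises KeyError on most malformed items, and the few malformed items its
-- definitions[0]/[:2] selection never touches are excluded with the rest of the malformed shape.
def Pre_generate_knowledge_summary_py (entities : List String) (knowledge_items : List (List (String × String))) : Prop :=
  entities = [] ∨ ∀ item ∈ knowledge_items,
    (item.map Prod.fst).Nodup ∧ "entity_name" ∈ item.map Prod.fst ∧
    "type" ∈ item.map Prod.fst ∧ "content" ∈ item.map Prod.fst
instance (entities : List String) (knowledge_items : List (List (String × String))) : Decidable (Pre_generate_knowledge_summary_py entities knowledge_items) := by unfold Pre_generate_knowledge_summary_py; infer_instance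

def pvWitness_generate_knowledge_summary_py : List String × (List (List (String × String))) :=
  (["e"], [[("entity_name", "e"), ("type", "note"), ("content", "c")]])

def Spec_generate_knowledge_summary_py (entities : List String) (knowledge_items : List (List (String × String))) (out : String) : Prop := out = generate_knowledge_summary_py_alt entities knowledge_items
instance (entities : List String) (knowledge_items : List (List (String × String))) (out : String) : Decidable (Spec_generate_knowledge_summary_py entities knowledge_items out) := by unfold Spec_generate_knowledge_summary_py; infer_instance

-- ===== CLAIM (what is proved, stated in full; the proofs are below) =====
def Claim_equal_generate_knowledge_summary_py : Prop := ∀ (entities : List String) (knowledge_items : List (List (String × String))), Dom_generate_knowledge_summary_py entities knowledge_items → Pre_generate_knowledge_summary_py entities knowledge_items → Spec_generate_knowledge_summary_py entities knowledge_items (generate_knowledge_summary_py entities knowledge_items)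

-- ===== LEMMAS AND PROOFS =====

def pvIsDef (i : List (String × String)) : Bool := pvKey i "type" == "定义"
def pvPair (i : List (String × String)) : String × String := (pvKey i "type", pvKey i "content")

theorem pvInner (g : List (List (String × String))) :
    ∀ st : Option String × List (String × String),
    g.foldl (fun st item =>
        if pvKey item "type" == "定义" then
          match st.1 with
          | none => (some (pvKey item "content"), st.2)
          | some _ => st
        else if st.2.length < 2 then (st.1, st.2 ++ [(pvKey item "type", pvKey item "content")])
        else st) st
    = ((match st.1 with
        | some c => some c
        | none => (g.filter pvIsDef).head?.map (fun i => pvKey i "content")),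
       st.2 ++ (((g.filter (fun i => !pvIsDef i)).map pvPair).take (2 - st.2.length))) := by
  induction g with
  | nil => intro st; obtain ⟨o,os⟩ := st; cases o <;> simp
  | cons i g ih =>
    intro st
    obtain ⟨o, os⟩ := st
    by_cases hdef : pvIsDef i
    · cases o with
      | none =>
        simp only [List.foldl_cons, pvIsDef] at hdef ⊢
        rw [if_pos hdef, ih]
        simp [hdef, pvIsDef]
      | some c =>
        simp only [List.foldl_cons, pvIsDef] at hdef ⊢
        rw [if_pos hdef, ih]
        simp [hdef, pvIsDef]
    · by_cases hlen : os.length < 2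
      · simp only [List.foldl_cons, pvIsDef] at hdef ⊢
        rw [if_neg (by simpa using hdef), if_pos hlen, ih]
        have h2 : 2 - os.length = (2 - (os.length + 1)) + 1 := by omega
        simp [hdef, pvIsDef, pvPair, h2, List.take_succ_cons]
      · simp only [List.foldl_cons, pvIsDef] at hdef ⊢
        rw [if_neg (by simpa using hdef), if_neg hlen, ih]
        have h2 : 2 - os.length = 0 := by omega
        simp [hdef, pvIsDef, h2]

def pvGroup (items : List (List (String × String))) (n : String) : List (List (String × String)) :=
  items.filter (fun i => pvKey i "entity_name" == n)

theorem pvA_step_eq_modify :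
    (fun (d : PySem.Dict String (List (List (String × String)))) item =>
      let entity_name := pvKey item "entity_name"
      let d := if d.contains entity_name then d else d.insert entity_name []
      d.insert entity_name (d.getD entity_name [] ++ [item])) =
    (fun d item => d.modify (pvKey item "entity_name") [] (· ++ [item])) := by
  funext d item
  simp only [PySem.Dict.modify]
  by_cases h : d.contains (pvKey item "entity_name")
  · simp [h]
  · rw [if_neg h, PySem.Dict.getD_insert_self, PySem.Dict.insert_insert_self,
      PySem.Dict.getD_of_not_contains d _ (by simpa using h)]

theorem pvByEntity_items (items : List (List (String × String))) :
    (items.foldl (fun d item =>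
      let entity_name := pvKey item "entity_name"
      let d := if d.contains entity_name then d else d.insert entity_name []
      d.insert entity_name (d.getD entity_name [] ++ [item])) PySem.Dict.empty).items
    = (PySem.Set.ofList (items.map (fun i => pvKey i "entity_name"))).map
        (fun n => (n, pvGroup items n)) := by
  rw [pvA_step_eq_modify]
  have hnd : (items.foldl (fun d item => d.modify (pvKey item "entity_name") [] (· ++ [item]))
      PySem.Dict.empty).keys.Nodup := by
    exact PySem.Dict.nodup_keys_foldl_modify_key items (fun i => pvKey i "entity_name") []
      (fun _ item => (· ++ [item])) PySem.Dict.empty (by simp [PySem.Dict.keys_empty])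
  rw [PySem.Dict.items_eq_map_keys _ hnd []]
  have hkeys : (items.foldl (fun d item => d.modify (pvKey item "entity_name") [] (· ++ [item]))
      PySem.Dict.empty).keys = PySem.Set.ofList (items.map (fun i => pvKey i "entity_name")) := by
    rw [PySem.Dict.keys_foldl_modify_key items (fun i => pvKey i "entity_name") []
      (fun _ item => (· ++ [item])) PySem.Dict.empty]
    simp [PySem.Dict.keys_empty, PySem.Set.update_nil_left]
  rw [hkeys]
  refine List.map_congr_left ?_
  intro n _
  have h := PySem.Dict.getD_foldl_modify_append
    (items.map (fun i => (pvKey i "entity_name", i))) PySem.Dict.empty n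
  rw [List.foldl_map] at h
  simp only [PySem.Dict.getD_empty, List.nil_append] at h
  rw [h]
  simp [pvGroup, List.filter_map, Function.comp_def]



theorem pvIntercalate_nil (L : List (List Char)) : List.intercalate ([] : List Char) L = L.flatten := by
  induction L with
  | nil => simp [List.intercalate]
  | cons a t ih => cases t <;> simp_all [List.intercalate, List.intersperse]

theorem pvJoinChars (L : List String) :
    (PySem.Str.join "" L).toList = (L.map String.toList).flatten := by
  simp [PySem.Str.join, PySem.Chars.join, pvIntercalate_nil]

def pvF (items : List (List (String × String))) (n : String) : List String :=
  (match (pvGroup items n).filter (fun i => pvKey i "type" == "定义") with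
    | [] => []
    | d0 :: _ => ["\n• " ++ n ++ ": " ++ pvKey d0 "content"]) ++
  (((pvGroup items n).filter (fun i => !(pvKey i "type" == "定义"))).take 2).map
    (fun i => "  - " ++ pvKey i "type" ++ ": " ++ pvTrunc50 (pvKey i "content") ++ "...")

def pvContrib (items : List (List (String × String))) (n : String) : List Char :=
  ((pvF items n).map String.toList).flatten

theorem pvSlice2 (others : List (List (String × String))) :
    PySem.List.slice others none (some 2) = others.take 2 := by
  simpa using PySem.List.slice_to_natCast others 2

theorem pvBodyA (items : List (List (String × String))) (parts : List String) (n : String) :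
    (let definitions := (pvGroup items n).filter (fun i => pvKey i "type" == "定义")
     let others := (pvGroup items n).filter (fun i => !(pvKey i "type" == "定义"))
     let parts2 := match definitions with
       | [] => parts
       | d0 :: _ => parts ++ ["\n• " ++ n ++ ": " ++ pvKey d0 "content"]
     (PySem.List.slice others none (some 2)).foldl (fun parts item =>
        parts ++ ["  - " ++ pvKey item "type" ++ ": " ++ pvTrunc50 (pvKey item "content") ++ "..."]) parts2)
    = parts ++ pvF items n := by
  simp only [pvSlice2, PySem.List.foldl_append_singleton_eq_map, pvF]
  cases (pvGroup items n).filter (fun i => pvKey i "type" == "定义") <;> simp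

theorem pvAfold (items : List (List (String × String))) (names : List String) :
    ∀ parts : List String,
    names.foldl (fun parts n =>
      let definitions := (pvGroup items n).filter (fun i => pvKey i "type" == "定义")
      let others := (pvGroup items n).filter (fun i => !(pvKey i "type" == "定义"))
      let parts2 := match definitions with
        | [] => parts
        | d0 :: _ => parts ++ ["\n• " ++ n ++ ": " ++ pvKey d0 "content"]
      (PySem.List.slice others none (some 2)).foldl (fun parts item =>
        parts ++ ["  - " ++ pvKey item "type" ++ ": " ++ pvTrunc50 (pvKey item "content") ++ "..."]) parts2)
      parts
    = parts ++ names.flatMap (pvF items) := by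
  induction names with
  | nil => intro parts; simp
  | cons n names ih =>
    intro parts
    rw [List.foldl_cons, pvBodyA, ih]
    simp

theorem pvLinesFold (l : List (String × String)) :
    ∀ out : String,
    (l.foldl (fun out tc => out ++ "  - " ++ tc.1 ++ ": " ++ pvTrunc50 tc.2 ++ "...") out).toList
    = out.toList ++ (l.map (fun tc => ("  - " ++ tc.1 ++ ": " ++ pvTrunc50 tc.2 ++ "...").toList)).flatten := by
  induction l with
  | nil => intro out; simp
  | cons tc l ih => intro out; rw [List.foldl_cons, ih]; simp

theorem pvBodyB (items : List (List (String × String))) (out : String) (n : String) :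
    (let st : Option String × List (String × String) :=
        items.foldl (fun st item =>
          if pvKey item "entity_name" == n then
            if pvKey item "type" == "定义" then
              match st.1 with
              | none => (some (pvKey item "content"), st.2)
              | some _ => st
            else if st.2.length < 2 then (st.1, st.2 ++ [(pvKey item "type", pvKey item "content")])
            else st
          else st) (none, [])
     let out2 := match st.1 with
       | none => out
       | some c => out ++ "\n• " ++ n ++ ": " ++ c
     st.2.foldl (fun out tc => out ++ "  - " ++ tc.1 ++ ": " ++ pvTrunc50 tc.2 ++ "...") out2).toList
    = out.toList ++ pvContrib items n := by
  rw [PySem.List.foldl_if_eq_foldl_filter (fun item => pvKey item "entity_name" == n)]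
  rw [show (List.filter (fun item => pvKey item "entity_name" == n) items) = pvGroup items n from rfl]
  rw [pvInner]
  simp only []
  rw [pvLinesFold]
  unfold pvContrib pvF
  simp only [show (fun i : List (String × String) => pvKey i "type" == "定义") = pvIsDef from rfl,
    show (fun i : List (String × String) => !(pvKey i "type" == "定义")) = (fun i => !pvIsDef i) from rfl]
  cases hd : (pvGroup items n).filter pvIsDef with
  | nil => simp [List.map_take, Function.comp_def, pvPair]
  | cons d0 rest => simp [List.map_take, Function.comp_def, pvPair]

theorem pvBfold (items : List (List (String × String))) (names : List String) :
    ∀ out : String,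
    (names.foldl (fun out name =>
      let st : Option String × List (String × String) :=
        items.foldl (fun st item =>
          if pvKey item "entity_name" == name then
            if pvKey item "type" == "定义" then
              match st.1 with
              | none => (some (pvKey item "content"), st.2)
              | some _ => st
            else if st.2.length < 2 then (st.1, st.2 ++ [(pvKey item "type", pvKey item "content")])
            else st
          else st) (none, [])
      let out2 := match st.1 with
        | none => out
        | some c => out ++ "\n• " ++ name ++ ": " ++ c
      st.2.foldl (fun out tc => out ++ "  - " ++ tc.1 ++ ": " ++ pvTrunc50 tc.2 ++ "...") out2) out).toList
    = out.toList ++ (names.map (pvContrib items)).flatten := by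
  induction names with
  | nil => intro out; simp
  | cons n names ih =>
    intro out
    rw [List.foldl_cons, ih, pvBodyB]
    simp

theorem pvFlat (items : List (List (String × String))) (names : List String) :
    ((names.flatMap (pvF items)).map String.toList).flatten
    = (names.map (pvContrib items)).flatten := by
  induction names with
  | nil => simp
  | cons n names ih => simp [pvContrib, ih]

theorem main_eq (entities : List String) (knowledge_items : List (List (String × String))) :
    generate_knowledge_summary_py entities knowledge_items
    = generate_knowledge_summary_py_alt entities knowledge_items := by
  by_cases he : entities = []
  · simp [generate_knowledge_summary_py, generate_knowledge_summary_py_alt, he]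
  · by_cases hk : knowledge_items = []
    · simp [generate_knowledge_summary_py, generate_knowledge_summary_py_alt, he, hk]
    · rw [← String.toList_inj]
      simp only [generate_knowledge_summary_py, generate_knowledge_summary_py_alt,
        if_neg he, if_neg hk, PySem.List.dedup]
      rw [pvByEntity_items]
      rw [List.foldl_map]
      simp only []
      rw [pvAfold]
      rw [pvBfold, pvJoinChars]
      simp [pvFlat]

-- ===== VERDICT (by name: the statement is the Claim_ definition above) =====
theorem generate_knowledge_summary_py_spec : Claim_equal_generate_knowledge_summary_py := by
  intro entities knowledge_items _ _
  unfold Spec_generate_knowledge_summary_py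
  exact main_eq entities knowledge_items
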